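-- pv_equiv track=rewrite | github.com/The-Violinist/HackerRank | Queen Attack/queens_attack2.py | NorEast
-- ===== SOURCE A (Python) =====
-- def NorEast(r_q, c_q, n, obstacles):
--     motion = 1                                                          # Direction of change for the column number
--     blocked = 0
--     for obs_item in obstacles:
--         r_diff = obs_item[0] - r_q                                      # Find the difference between the queen starting row and the obstacle
--         if obs_item[0] > r_q and obs_item[1] > c_q:                     # If the block is NE from the queen
--             column = c_q + (r_diff * motion)                            # The column of the queen position based on the row positions in the obstacles
--             if ([obs_item[0], column]) == obs_item:                     # If the queen would encounter that block:
--                 if (n - column + 1) > (n - obs_item[0] + 1):            # Determine which side is reached first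
--                     if (n - obs_item[0] + 1) > blocked:                 # Top first
--                         blocked = (n - obs_item[0] + 1)
--                 else:
--                     if (n - column + 1) > blocked:                      # Right side first
--                         blocked = (n - column + 1)
--     return blocked                                                      # Return the greatest number of blocked spaces
-- ===== SOURCE B (Python) =====
-- def NorEast(r_q, c_q, n, obstacles):
--     diag = {o[0] - r_q for o in obstacles
--             if len(o) == 2 and o[0] > r_q and o[1] - c_q == o[0] - r_q}
--     total = min(n - r_q, n - c_q)
--     for d in sorted(diag):
--         if d <= total:
--             return total - d + 1
--     return 0
-- ===== Notes on version B (the rewrite author's own statement) =====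
-- stated objective: alternative
-- what changed: A keeps a running maximum over obstacles via a cascade of nested ifs comparing edge distances; B instead stages the work: it builds a set of diagonal offsets, sorts it ascending, and scans the sorted offsets with an early return at the first offset within reach, so no accumulator or per-obstacle maximum is maintained.
import Mathlib
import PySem

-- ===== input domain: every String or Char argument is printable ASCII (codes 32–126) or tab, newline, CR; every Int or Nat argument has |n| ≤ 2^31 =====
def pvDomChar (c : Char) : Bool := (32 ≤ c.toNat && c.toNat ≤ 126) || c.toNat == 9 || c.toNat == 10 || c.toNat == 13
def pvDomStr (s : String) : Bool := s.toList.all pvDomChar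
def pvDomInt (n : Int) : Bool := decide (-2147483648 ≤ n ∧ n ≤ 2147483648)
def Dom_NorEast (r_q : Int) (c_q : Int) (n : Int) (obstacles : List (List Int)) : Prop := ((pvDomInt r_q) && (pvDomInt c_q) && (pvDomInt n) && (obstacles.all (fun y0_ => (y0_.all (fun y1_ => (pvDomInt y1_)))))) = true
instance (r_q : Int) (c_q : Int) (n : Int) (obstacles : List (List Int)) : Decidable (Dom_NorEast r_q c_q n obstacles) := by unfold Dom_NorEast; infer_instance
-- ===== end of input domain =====

-- B replaces A's running-max nested-if scan by staged passes: a set of diagonal offsets,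
-- sorted ascending, scanned with an early return at the first offset within reach
-- (alternative decomposition; not claimed faster). Equivalence of RETURN values.

-- ===== PORT A =====
-- literal transliteration of A's loop body; obstacle indexing via PySem.List.pyGet?
-- (.getD 0 is only reached on inputs excluded by Pre_NorEast, where the Python raises IndexError)
def NorEastStep (r_q : Int) (c_q : Int) (n : Int) (blocked : Int) (obs_item : List Int) : Int :=
  let motion : Int := 1
  let o0 := (PySem.List.pyGet? obs_item 0).getD 0
  let o1 := (PySem.List.pyGet? obs_item 1).getD 0
  let r_diff := o0 - r_q
  if o0 > r_q && o1 > c_q then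
    let column := c_q + r_diff * motion
    if [o0, column] = obs_item then
      if n - column + 1 > n - o0 + 1 then
        (if n - o0 + 1 > blocked then n - o0 + 1 else blocked)
      else
        (if n - column + 1 > blocked then n - column + 1 else blocked)
    else blocked
  else blocked

def NorEast (r_q : Int) (c_q : Int) (n : Int) (obstacles : List (List Int)) : Int :=
  obstacles.foldl (NorEastStep r_q c_q n) 0

-- ===== PORT B =====
-- B's set-comprehension filter: o is a two-element obstacle strictly NE of the queen on its diagonal
def NorEastDiag (r_q : Int) (c_q : Int) (o : List Int) : Bool :=
  o.length = 2 && (PySem.List.pyGet? o 0).getD 0 > r_q &&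
  (PySem.List.pyGet? o 1).getD 0 - c_q = (PySem.List.pyGet? o 0).getD 0 - r_q

-- B's for-loop with early return over the sorted offsets
def NorEastScan (total : Int) : List Int → Int
  | [] => 0
  | d :: rest => if d ≤ total then total - d + 1 else NorEastScan total rest

def NorEast_alt (r_q : Int) (c_q : Int) (n : Int) (obstacles : List (List Int)) : Int :=
  let diag : PySem.Set Int := PySem.Set.ofList
      ((obstacles.filter (NorEastDiag r_q c_q)).map (fun o => (PySem.List.pyGet? o 0).getD 0 - r_q))
  let total := min (n - r_q) (n - c_q)
  NorEastScan total (PySem.List.sorted diag (fun x => x) false)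

-- ===== PRECONDITION & SPEC =====
-- Pre_ excludes exactly the inputs where the Python A raises IndexError: an empty obstacle,
-- or a one-element obstacle with row above the queen's (obs_item[1] is then accessed).
def Pre_NorEast (r_q : Int) (c_q : Int) (n : Int) (obstacles : List (List Int)) : Prop :=
  ∀ o ∈ obstacles, o ≠ [] ∧ (o.headI > r_q → 2 ≤ o.length)
instance (r_q : Int) (c_q : Int) (n : Int) (obstacles : List (List Int)) : Decidable (Pre_NorEast r_q c_q n obstacles) := by unfold Pre_NorEast; infer_instance
def pvWitness_NorEast : Int × Int × Int × List (List Int) := (1, 1, 4, [[2, 2], [3, 3]])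

def Spec_NorEast (r_q : Int) (c_q : Int) (n : Int) (obstacles : List (List Int)) (out : Int) : Prop := out = NorEast_alt r_q c_q n obstacles
instance (r_q : Int) (c_q : Int) (n : Int) (obstacles : List (List Int)) (out : Int) : Decidable (Spec_NorEast r_q c_q n obstacles out) := by unfold Spec_NorEast; infer_instance

-- ===== CLAIM (what is proved, stated in full; the proofs are below) =====
def Claim_equal_NorEast : Prop := ∀ (r_q : Int) (c_q : Int) (n : Int) (obstacles : List (List Int)), Dom_NorEast r_q c_q n obstacles → Pre_NorEast r_q c_q n obstacles → Spec_NorEast r_q c_q n obstacles (NorEast r_q c_q n obstacles)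

-- ===== LEMMAS AND PROOFS =====

-- A's loop body, per obstacle: either ignore it or take the running max with total - d + 1
lemma NorEast_step_case (r_q c_q n b : Int) (o : List Int) :
    NorEastStep r_q c_q n b o
      = if NorEastDiag r_q c_q o then
          max b (min (n - r_q) (n - c_q) - ((PySem.List.pyGet? o 0).getD 0 - r_q) + 1)
        else b := by
  match o with
  | [] =>
    simp [NorEastStep, NorEastDiag, PySem.List.pyGet?, PySem.List.pyIdx?]
  | [x] =>
    simp [NorEastStep, NorEastDiag, PySem.List.pyGet?, PySem.List.pyIdx?]
  | x :: y :: z :: t =>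
    simp [NorEastStep, NorEastDiag, PySem.List.pyGet?, PySem.List.pyIdx?]
  | [x, y] =>
    simp only [NorEastStep, NorEastDiag, PySem.List.pyGet?, PySem.List.pyIdx?]
    simp only [Int.min_def, Int.max_def]
    norm_num
    split_ifs <;> simp_all <;> omega

-- A's whole loop is a fold of max over the offsets of the diagonal obstacles
lemma NorEast_fold_eq (r_q c_q n : Int) (os : List (List Int)) : ∀ b : Int,
    os.foldl (NorEastStep r_q c_q n) b
      = ((os.filter (NorEastDiag r_q c_q)).map
          (fun o => (PySem.List.pyGet? o 0).getD 0 - r_q)).foldl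
          (fun a d => max a (min (n - r_q) (n - c_q) - d + 1)) b := by
  induction os with
  | nil => intro b; rfl
  | cons o os ih =>
    intro b
    rw [List.foldl_cons, NorEast_step_case]
    by_cases h : NorEastDiag r_q c_q o
    · simp only [h, if_pos, List.filter_cons_of_pos h, List.map_cons, List.foldl_cons]
      exact ih _
    · simp only [h, List.filter_cons_of_neg h]
      simpa using ih b

-- the max-fold collapses to the minimum offset
lemma foldl_max_min? (T : Int) (l : List Int) : ∀ b : Int,
    l.foldl (fun a d => max a (T - d + 1)) b
      = match l.min? with
        | none => b
        | some m => max b (T - m + 1) := by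
  induction l with
  | nil => intro b; rfl
  | cons x xs ih =>
    intro b
    rw [List.foldl_cons, ih]
    rcases h : xs.min? with _ | m
    · rw [List.min?_eq_none_iff] at h
      subst h
      simp
    · have hx : (x :: xs).min? = some (min x m) := by
        rw [List.min?_cons, h]
        rfl
      rw [hx]
      simp only [Int.min_def, Int.max_def]
      split_ifs <;> omega

-- B's scan returns 0 when every offset is out of reach
lemma NorEastScan_all_gt (T : Int) (s : List Int) (h : ∀ x ∈ s, T < x) :
    NorEastScan T s = 0 := by
  induction s with
  | nil => rfl
  | cons d rest ih =>
    have hd := h d (by simp)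
    simp only [NorEastScan, if_neg (by omega : ¬ d ≤ T)]
    exact ih (fun x hx => h x (by simp [hx]))

-- B's scan over the sorted distinct offsets equals the closed form on the minimum offset
lemma NorEastScan_sorted_set (T : Int) (l : List Int) :
    NorEastScan T (PySem.List.sorted (PySem.Set.ofList l) (fun x => x) false)
      = match l.min? with
        | none => 0
        | some m => if m ≤ T then T - m + 1 else 0 := by
  rcases hs : PySem.List.sorted (PySem.Set.ofList l) (fun x => x) false with _ | ⟨m, rest⟩
  · have hl : l = [] := by
      rw [PySem.List.sorted_eq_nil_iff] at hs
      cases hl' : l with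
      | nil => rfl
      | cons a t =>
        exfalso
        have : a ∈ PySem.Set.ofList l := by
          rw [PySem.Set.mem_ofList]; simp [hl']
        rw [hs] at this; simp at this
    subst hl; rfl
  · -- nonempty: head m is the minimum of l
    have hmem : m ∈ l := by
      have : m ∈ PySem.List.sorted (PySem.Set.ofList l) (fun x => x) false := by simp [hs]
      rw [PySem.List.mem_sorted, PySem.Set.mem_ofList] at this; exact this
    have hle : ∀ y ∈ l, m ≤ y := by
      intro y hy
      exact PySem.List.key_head_sorted_le _ _ hs y ((PySem.Set.mem_ofList _ _).mpr hy)
    have hmin : l.min? = some m := List.min?_eq_some_iff.mpr ⟨hmem, hle⟩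
    rw [hmin]
    by_cases hT : m ≤ T
    · simp [NorEastScan, hT]
    · simp only [NorEastScan, if_neg hT]
      have hsortpw := PySem.List.sorted_pairwise (PySem.Set.ofList l) (fun x => x)
      rw [hs, List.pairwise_cons] at hsortpw
      exact NorEastScan_all_gt T rest (fun x hx => by have := hsortpw.1 x hx; omega)

-- unfold B to the same filtered-offset list
lemma NorEast_alt_eq (r_q c_q n : Int) (obstacles : List (List Int)) :
    NorEast_alt r_q c_q n obstacles
      = NorEastScan (min (n - r_q) (n - c_q))
          (PySem.List.sorted
            (PySem.Set.ofList ((obstacles.filter (NorEastDiag r_q c_q)).map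
              (fun o => (PySem.List.pyGet? o 0).getD 0 - r_q)))
            (fun x => x) false) := rfl

-- ===== VERDICT (by name: the statement is the Claim_ definition above) =====
theorem NorEast_spec : Claim_equal_NorEast := by
  intro r_q c_q n obstacles _ _
  unfold Spec_NorEast NorEast
  rw [NorEast_fold_eq, foldl_max_min?, NorEast_alt_eq, NorEastScan_sorted_set]
  cases h : ((obstacles.filter (NorEastDiag r_q c_q)).map
      (fun o => (PySem.List.pyGet? o 0).getD 0 - r_q)).min? with
  | none => rfl
  | some m =>
    simp only
    split_ifs with hT <;> omega
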